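-- pv_equiv track=rewrite | github.com/hyo-nu/Algorithm_Training | 프로그래머스/lv2/42584. 주식가격/주식가격.py | solution
-- ===== SOURCE A (Python) =====
-- def solution(prices):
--     answer = []
--     for SP in range(len(prices)):
--         second = 0
--         for NP in range(SP+1, len(prices)):
--             second += 1
--             if prices[SP] > prices[NP] : break
--         answer.append(second)
--
--     return answer
-- ===== SOURCE B (Python) =====
-- def solution(prices):
--     n = len(prices)
--     answer = [0] * n
--     stack = []
--     for j, p in enumerate(prices):
--         while stack and prices[stack[-1]] > p:
--             i = stack.pop()
--             answer[i] = j - i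
--         stack.append(j)
--     for i in stack:
--         answer[i] = n - 1 - i
--     return answer
-- ===== Notes on version B (the rewrite author's own statement) =====
-- stated objective: faster
-- what changed: Replaced the quadratic per-index forward rescan with a single left-to-right pass over a monotonic stack of unresolved indices, resolving each duration when a price drop pops it.
import Mathlib
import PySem

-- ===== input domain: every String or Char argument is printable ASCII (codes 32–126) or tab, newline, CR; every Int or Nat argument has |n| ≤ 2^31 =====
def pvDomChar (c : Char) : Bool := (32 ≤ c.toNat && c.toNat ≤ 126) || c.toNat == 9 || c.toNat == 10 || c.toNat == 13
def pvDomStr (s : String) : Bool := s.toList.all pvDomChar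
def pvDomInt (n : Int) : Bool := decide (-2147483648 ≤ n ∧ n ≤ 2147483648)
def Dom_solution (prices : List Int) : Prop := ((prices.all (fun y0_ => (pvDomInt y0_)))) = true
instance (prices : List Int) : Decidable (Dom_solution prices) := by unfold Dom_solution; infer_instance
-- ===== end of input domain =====

-- B replaces A's quadratic per-index forward rescan by one linear pass with a
-- monotonic stack of unresolved indices (objective: faster, asymptotic O(n^2) → O(n)).

-- ===== PORT A =====
-- inner loop: 'second = 0; for NP in range(SP+1, n): second += 1; if prices[SP] > prices[NP]: break'
-- (the iterated values prices[NP] are exactly the elements after position SP, scanned in order)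
def solInner (pSP : Int) : List Int → Int → Int
  | [], second => second
  | x :: rest, second =>
      let second := second + 1
      if pSP > x then second else solInner pSP rest second

-- outer loop: for each SP in order, append the inner count over the remaining suffix
def solOuter : List Int → List Int
  | [] => []
  | x :: rest => solInner x rest 0 :: solOuter rest

def solution (prices : List Int) : List Int := solOuter prices

-- ===== PORT B =====
-- enumerate(prices) starting at index j
def pyEnum : Nat → List Int → List (Nat × Int)
  | _, [] => []
  | j, p :: rest => (j, p) :: pyEnum (j + 1) rest

-- 'while stack and prices[stack[-1]] > p: i = stack.pop(); answer[i] = j - i'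
-- (stack head = Python's stack[-1])
def bWhile (prices : List Int) (p : Int) (j : Nat) :
    List Nat → List Int → (List Int × List Nat)
  | [], answer => (answer, [])
  | i :: s, answer =>
      if prices.getD i 0 > p then
        bWhile prices p j s (answer.set i ((j : Int) - (i : Int)))
      else (answer, i :: s)

-- 'for j, p in enumerate(prices): <while>; stack.append(j)'
def bLoop (prices : List Int) :
    List (Nat × Int) → List Int → List Nat → (List Int × List Nat)
  | [], answer, stack => (answer, stack)
  | (j, p) :: rest, answer, stack =>
      let r := bWhile prices p j stack answer
      bLoop prices rest r.1 (j :: r.2)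

-- 'for i in stack: answer[i] = n - 1 - i'
def bFinal (n : Nat) : List Nat → List Int → List Int
  | [], answer => answer
  | i :: s, answer => bFinal n s (answer.set i ((n : Int) - 1 - (i : Int)))

def solution_alt (prices : List Int) : List Int :=
  let n := prices.length
  let r := bLoop prices (pyEnum 0 prices) (List.replicate n 0) []
  bFinal n r.2 r.1

-- ===== PRECONDITION & SPEC =====
def Spec_solution (prices : List Int) (out : List Int) : Prop := out = solution_alt prices
instance (prices : List Int) (out : List Int) : Decidable (Spec_solution prices out) := by unfold Spec_solution; infer_instance

-- ===== CLAIM (what is proved, stated in full; the proofs are below) =====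
def Claim_equal_solution : Prop := ∀ (prices : List Int), Dom_solution prices → Spec_solution prices (solution prices)

-- ===== LEMMAS AND PROOFS =====

-- the count A's inner loop produces, as a Nat
def cnt (p : Int) : List Int → Nat
  | [] => 0
  | x :: rest => if p > x then 1 else 1 + cnt p rest

-- index i is still unresolved after seeing prices[0..j)
def unres (prices : List Int) (i j : Nat) : Prop :=
  ∀ k, i < k → k < j → prices.getD i 0 ≤ prices.getD k 0

-- loop invariant of B after processing prices[0..j)
def BInv (prices : List Int) (j : Nat) (answer : List Int) (stack : List Nat) : Prop :=
  answer.length = prices.length ∧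
  (∀ i ∈ stack, i < j ∧ unres prices i j) ∧
  stack.Pairwise (fun a b => b < a ∧ prices.getD b 0 ≤ prices.getD a 0) ∧
  (∀ i, i < j → i ∉ stack →
    answer.getD i 0 = (cnt (prices.getD i 0) (prices.drop (i + 1)) : Int))

theorem solInner_eq_cnt (p : Int) (t : List Int) (c : Int) :
    solInner p t c = c + (cnt p t : Int) := by
  induction t generalizing c with
  | nil => simp [solInner, cnt]
  | cons x rest ih =>
      simp only [solInner, cnt]
      split_ifs with h
      · push_cast; ring
      · rw [ih]; push_cast; ring

theorem getD_set_ne (l : List Int) (i i' : Nat) (v : Int) (h : i' ≠ i) :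
    (l.set i v).getD i' 0 = l.getD i' 0 := by
  simp [List.getD, List.getElem?_set_ne (Ne.symm h)]

theorem getD_set_self (l : List Int) (i : Nat) (v : Int) (h : i < l.length) :
    (l.set i v).getD i 0 = v := by
  simp [List.getD, h]

-- if every scanned element is ≥ p, the inner loop runs to the end
theorem cnt_all_ge (p : Int) (t : List Int) (h : ∀ x ∈ t, p ≤ x) :
    cnt p t = t.length := by
  induction t with
  | nil => simp [cnt]
  | cons x rest ih =>
      have hx := h x (by simp)
      have : ¬ p > x := not_lt.mpr hx
      simp [cnt, this, ih (fun y hy => h y (by simp [hy]))]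
      omega

-- if the first j - (i+1) elements are ≥ p and the next one is < p, the loop breaks there
theorem cnt_break (p : Int) (t : List Int) (m : Nat) (hm : m < t.length)
    (hpre : ∀ k, k < m → p ≤ t.getD k 0) (hdrop : p > t.getD m 0) :
    cnt p t = m + 1 := by
  induction t generalizing m with
  | nil => simp at hm
  | cons x rest ih =>
      cases m with
      | zero => simp [List.getD] at hdrop; simp [cnt, hdrop]
      | succ m' =>
          have hx : p ≤ x := by have := hpre 0 (Nat.succ_pos _); simpa [List.getD] using this
          have : ¬ p > x := not_lt.mpr hx
          simp only [cnt, this, if_false]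
          rw [ih m' (by simpa using hm)
            (fun k hk => by simpa [List.getD] using hpre (k+1) (by omega))
            (by simpa [List.getD] using hdrop)]
          omega

theorem getD_drop (l : List Int) (a k : Nat) :
    (l.drop a).getD k 0 = l.getD (a + k) 0 := by
  simp [List.getD, List.getElem?_drop]

-- an unresolved index that sees a strictly smaller price at j gets duration j - i
theorem cnt_resolved (prices : List Int) (i j : Nat) (hij : i < j)
    (hj : j < prices.length) (hu : unres prices i j)
    (hd : prices.getD i 0 > prices.getD j 0) :
    (cnt (prices.getD i 0) (prices.drop (i + 1)) : Int) = (j : Int) - (i : Int) := by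
  have hm : j - (i + 1) < (prices.drop (i + 1)).length := by
    simp [List.length_drop]; omega
  rw [cnt_break _ _ (j - (i+1)) hm
      (fun k hk => by rw [getD_drop]; exact hu (i+1+k) (by omega) (by omega))
      (by rw [getD_drop]; have : i + 1 + (j - (i+1)) = j := by omega
          rw [this]; exact hd)]
  push_cast; omega

-- an index unresolved at the end scans the whole suffix
theorem cnt_unres_end (prices : List Int) (i : Nat) (hi : i < prices.length)
    (hu : unres prices i prices.length) :
    (cnt (prices.getD i 0) (prices.drop (i + 1)) : Int)
      = (prices.length : Int) - 1 - (i : Int) := by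
  rw [cnt_all_ge]
  · simp [List.length_drop]; omega
  · intro x hx
    obtain ⟨k, hk, hget⟩ := List.getElem_of_mem hx
    have hk' : k < prices.length - (i+1) := by simpa [List.length_drop] using hk
    have hx' : (prices.drop (i+1)).getD k 0 = x := by
      simp [List.getD, List.getElem?_eq_getElem hk, hget]
    rw [← hx', getD_drop]
    exact hu (i+1+k) (by omega) (by omega)

-- the while loop preserves the invariant and ends ready for the push of j
theorem bWhile_inv (prices : List Int) (j : Nat) (hj : j < prices.length) :
    ∀ (stack : List Nat) (answer : List Int),
      BInv prices j answer stack →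
      BInv prices (j + 1)
        (bWhile prices (prices.getD j 0) j stack answer).1
        (j :: (bWhile prices (prices.getD j 0) j stack answer).2) := by
  intro stack
  induction stack with
  | nil =>
      rintro answer ⟨hlen, -, -, hres⟩
      have hred : bWhile prices (prices.getD j 0) j [] answer = (answer, []) := rfl
      rw [hred]
      refine ⟨hlen, ?_, by simp, ?_⟩
      · intro i hi
        rcases List.mem_singleton.mp hi with rfl
        exact ⟨by omega, fun k hk1 hk2 => by omega⟩
      · intro i hi hni
        simp at hni
        exact hres i (by omega) (by simp)
  | cons i0 s ih =>
      rintro answer ⟨hlen, hmem, hpw, hres⟩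
      by_cases hpop : prices.getD i0 0 > prices.getD j 0
      · -- pop i0, set answer[i0] := j - i0, continue
        have hi0 := hmem i0 (by simp)
        have hred : bWhile prices (prices.getD j 0) j (i0 :: s) answer
            = bWhile prices (prices.getD j 0) j s
                (answer.set i0 ((j : Int) - (i0 : Int))) := by
          simp only [bWhile]
          rw [if_pos hpop]
        have hInv' : BInv prices j (answer.set i0 ((j:Int) - (i0:Int))) s := by
          refine ⟨by simp [hlen], fun i hi => hmem i (by simp [hi]), hpw.of_cons, ?_⟩
          intro i hi hni
          by_cases hii : i = i0
          · subst hii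
            rw [getD_set_self _ _ _ (by rw [hlen]; omega)]
            exact (cnt_resolved prices i j hi0.1 hj hi0.2 hpop).symm
          · rw [getD_set_ne _ _ _ _ hii]
            exact hres i hi (by simp [hii, hni])
        rw [hred]
        exact ih _ hInv'
      · -- stop; result is (answer, i0 :: s), then push j
        have hi0 := hmem i0 (by simp)
        have hle : prices.getD i0 0 ≤ prices.getD j 0 := not_lt.mp hpop
        have hbelow : ∀ b ∈ s, prices.getD b 0 ≤ prices.getD j 0 := by
          intro b hb
          exact le_trans ((List.pairwise_cons.mp hpw).1 b hb).2 hle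
        have hred : bWhile prices (prices.getD j 0) j (i0 :: s) answer
            = (answer, i0 :: s) := by
          simp only [bWhile]
          rw [if_neg hpop]
        rw [hred]
        refine ⟨hlen, ?_, ?_, ?_⟩
        · intro i hi
          simp at hi
          rcases hi with hi | hi | hi
          · subst hi; exact ⟨by omega, fun k h1 h2 => by omega⟩
          · subst hi
            refine ⟨by omega, fun k h1 h2 => ?_⟩
            by_cases hkj : k = j
            · subst hkj; exact hle
            · exact hi0.2 k h1 (by omega)
          · have hm := hmem i (by simp [hi])
            refine ⟨by omega, fun k h1 h2 => ?_⟩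
            by_cases hkj : k = j
            · subst hkj; exact hbelow i hi
            · exact hm.2 k h1 (by omega)
        · refine List.pairwise_cons.mpr ⟨?_, hpw⟩
          intro b hb
          simp at hb
          rcases hb with hb | hb
          · subst hb; exact ⟨hi0.1, hle⟩
          · exact ⟨by have := (hmem b (by simp [hb])).1; omega, hbelow b hb⟩
        · intro i hi hni
          simp at hni
          exact hres i (by omega) (by simp [hni.2.1, hni.2.2])

theorem bLoop_inv (prices : List Int) :
    ∀ (rest : List Int) (j : Nat) (answer : List Int) (stack : List Nat),
      rest = prices.drop j → j ≤ prices.length →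
      BInv prices j answer stack →
      BInv prices prices.length
        (bLoop prices (pyEnum j rest) answer stack).1
        (bLoop prices (pyEnum j rest) answer stack).2 := by
  intro rest
  induction rest with
  | nil =>
      intro j answer stack hdrop hjle hinv
      have hjn : prices.length ≤ j := by
        have := List.drop_eq_nil_iff.mp hdrop.symm
        omega
      have : j = prices.length := by omega
      subst this
      simpa [pyEnum, bLoop] using hinv
  | cons p rest' ih =>
      intro j answer stack hdrop hjle hinv
      have hj : j < prices.length := by
        by_contra h
        rw [List.drop_eq_nil_of_le (by omega)] at hdrop
        exact (List.cons_ne_nil _ _) hdrop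
      have hj? : prices[j]? = some p := by
        have h1 : (prices.drop j)[0]? = some p := by rw [← hdrop]; rfl
        rw [List.getElem?_drop] at h1
        simpa using h1
      have hp : prices.getD j 0 = p := by simp [List.getD, hj?]
      have hrest : rest' = prices.drop (j + 1) := by
        have h2 := congrArg (List.drop 1) hdrop
        simpa [List.drop_drop, Nat.add_comm] using h2
      have hstep := bWhile_inv prices j hj stack answer hinv
      rw [hp] at hstep
      simpa [pyEnum, bLoop] using ih (j+1) _ _ hrest (by omega) hstep

theorem bFinal_spec (prices : List Int) :
    ∀ (stack : List Nat) (answer : List Int),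
      BInv prices prices.length answer stack →
      ∀ i, i < prices.length →
        (bFinal prices.length stack answer).getD i 0
          = (cnt (prices.getD i 0) (prices.drop (i + 1)) : Int) := by
  intro stack
  induction stack with
  | nil =>
      rintro answer ⟨-, -, -, hres⟩ i hi
      simpa [bFinal] using hres i hi (by simp)
  | cons i0 s ih =>
      rintro answer ⟨hlen, hmem, hpw, hres⟩ i hi
      have hi0 := hmem i0 (by simp)
      have hInv' : BInv prices prices.length
          (answer.set i0 ((prices.length : Int) - 1 - (i0 : Int))) s := by
        refine ⟨by simp [hlen], fun i' hi' => hmem i' (by simp [hi']), hpw.of_cons, ?_⟩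
        intro i' hi' hni'
        by_cases hii : i' = i0
        · subst hii
          rw [getD_set_self _ _ _ (by rw [hlen]; exact hi0.1)]
          exact (cnt_unres_end prices i' hi0.1 hi0.2).symm
        · rw [getD_set_ne _ _ _ _ hii]
          exact hres i' hi' (by simp [hii, hni'])
      simpa [bFinal] using ih _ hInv' i hi

theorem bFinal_length (n : Nat) :
    ∀ (stack : List Nat) (answer : List Int),
      (bFinal n stack answer).length = answer.length := by
  intro stack
  induction stack with
  | nil => intro answer; simp [bFinal]
  | cons i0 s ih => intro answer; simp [bFinal, ih]

theorem solOuter_length (l : List Int) : (solOuter l).length = l.length := by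
  induction l with
  | nil => simp [solOuter]
  | cons x rest ih => simp [solOuter, ih]

theorem solOuter_getD (l : List Int) :
    ∀ i, i < l.length →
      (solOuter l).getD i 0 = (cnt (l.getD i 0) (l.drop (i + 1)) : Int) := by
  induction l with
  | nil => intro i hi; simp at hi
  | cons x rest ih =>
      intro i hi
      cases i with
      | zero => simp [solOuter, List.getD, solInner_eq_cnt]
      | succ i' =>
          simp only [solOuter]
          have := ih i' (by simpa using hi)
          simpa [List.getD] using this

theorem BInv_init (prices : List Int) :
    BInv prices 0 (List.replicate prices.length 0) [] := by
  refine ⟨by simp, by simp, by simp, ?_⟩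
  intro i hi; omega

-- ===== VERDICT (by name: the statement is the Claim_ definition above) =====
theorem solution_spec : Claim_equal_solution := by
  intro prices _
  unfold Spec_solution solution solution_alt
  have hinv := bLoop_inv prices prices (0 : Nat)
      (List.replicate prices.length 0) [] (by simp) (by omega) (BInv_init prices)
  set r := bLoop prices (pyEnum 0 prices) (List.replicate prices.length 0) []
  have hlen : (bFinal prices.length r.2 r.1).length = prices.length := by
    rw [bFinal_length]
    exact hinv.1
  apply List.ext_getElem (by rw [solOuter_length, hlen])
  intro i h1 h2
  have hi : i < prices.length := by rwa [solOuter_length] at h1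
  have hA := solOuter_getD prices i hi
  have hB := bFinal_spec prices r.2 r.1 hinv i hi
  have eA : (solOuter prices)[i] = (solOuter prices).getD i 0 := by
    simp [List.getD, List.getElem?_eq_getElem h1]
  have h2' : i < (bFinal prices.length r.2 r.1).length := by rw [hlen]; exact hi
  have eB : (bFinal prices.length r.2 r.1)[i]
      = (bFinal prices.length r.2 r.1).getD i 0 := by
    simp [List.getD, List.getElem?_eq_getElem h2']
  rw [eA, eB, hA, hB]
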